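-- pv_equiv track=rewrite | github.com/MoiMohamed/en-ar-word-alignments | models/awesome-align/scripts/run_awesome_align.py | format_alignments
-- ===== SOURCE A (Python) =====
-- def format_alignments(ar_words, en_words, alignments):
--     """Format alignments in readable format."""
--     # Group target words by source word
--     src_to_tgt = {}
--     for src_idx, tgt_idx in alignments:
--         if src_idx < len(ar_words) and tgt_idx < len(en_words):
--             if src_idx not in src_to_tgt:
--                 src_to_tgt[src_idx] = []
--             src_to_tgt[src_idx].append(tgt_idx)
--
--     # Format as (source, [targets])
--     formatted = []
--     for src_idx in sorted(src_to_tgt.keys()):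
--         tgt_indices = sorted(src_to_tgt[src_idx])
--         src_word = ar_words[src_idx]
--         tgt_words = [en_words[i] for i in tgt_indices]
--
--         if len(tgt_words) == 1:
--             formatted.append(f'({src_word}, {tgt_words[0]})')
--         else:
--             formatted.append(f'({src_word}, [{", ".join(tgt_words)}])')
--
--     return ', '.join(formatted)
-- ===== SOURCE B (Python) =====
-- def format_alignments(ar_words, en_words, alignments):
--     """Format alignments in readable format (sort-once + linear group scan, no dict)."""
--     valid = sorted((s, t) for s, t in alignments
--                    if s < len(ar_words) and t < len(en_words))
--     parts = []
--     i = 0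
--     n = len(valid)
--     while i < n:
--         s = valid[i][0]
--         tgts = []
--         while i < n and valid[i][0] == s:
--             tgts.append(valid[i][1])
--             i += 1
--         src_word = ar_words[s]
--         tgt_words = [en_words[t] for t in tgts]
--         if len(tgt_words) == 1:
--             parts.append(f'({src_word}, {tgt_words[0]})')
--         else:
--             parts.append(f'({src_word}, [{", ".join(tgt_words)}])')
--     return ', '.join(parts)
-- ===== Notes on version B (the rewrite author's own statement) =====
-- stated objective: alternative
-- what changed: Replaces A's dict-grouping (build src->targets dict, then sort keys and re-sort each value list) by one lexicographic sort of the valid (src,tgt) pairs followed by a single linear group scan, with no intermediate dict and no per-key sorting.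
import Mathlib
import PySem

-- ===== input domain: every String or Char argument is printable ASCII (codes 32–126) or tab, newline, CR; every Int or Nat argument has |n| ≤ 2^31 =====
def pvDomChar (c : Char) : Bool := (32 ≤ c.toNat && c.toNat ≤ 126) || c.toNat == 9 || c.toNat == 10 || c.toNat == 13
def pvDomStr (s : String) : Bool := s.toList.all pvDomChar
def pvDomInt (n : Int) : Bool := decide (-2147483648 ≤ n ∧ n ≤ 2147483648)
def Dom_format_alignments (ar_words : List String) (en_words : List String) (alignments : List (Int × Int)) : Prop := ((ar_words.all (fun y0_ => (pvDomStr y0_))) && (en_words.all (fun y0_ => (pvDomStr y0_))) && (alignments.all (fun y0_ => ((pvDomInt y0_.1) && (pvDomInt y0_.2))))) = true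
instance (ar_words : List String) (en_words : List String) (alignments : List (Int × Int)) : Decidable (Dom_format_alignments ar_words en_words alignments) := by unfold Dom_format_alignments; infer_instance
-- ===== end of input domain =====

-- B replaces A's dict-then-sort-per-key grouping by one lexicographic sort of the valid
-- pairs followed by a single linear group scan (objective: alternative decomposition).

-- ===== PORT A =====
-- literal port of A: build dict src→targets over the filtered pairs, then walk sorted keys,
-- sorting each value list and formatting.  xs[i] is PySem.List.pyGet? with default "" — the
-- default is never reached inside Pre_ (Python raises exactly there).
def format_alignments (ar_words : List String) (en_words : List String) (alignments : List (Int × Int)) : String :=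
  let src_to_tgt := alignments.foldl
    (fun (d : PySem.Dict Int (List Int)) p =>
      if p.1 < (ar_words.length : Int) ∧ p.2 < (en_words.length : Int) then
        d.modify p.1 [] (fun ts => ts ++ [p.2])
      else d) PySem.Dict.empty
  let formatted := (PySem.List.sorted src_to_tgt.keys (fun k => k) false).foldl
    (fun acc s =>
      let tgt_indices := PySem.List.sorted (src_to_tgt.getD s []) (fun t => t) false
      let src_word := (PySem.List.pyGet? ar_words s).getD ""
      let tgt_words := tgt_indices.map (fun i => (PySem.List.pyGet? en_words i).getD "")
      if tgt_words.length == 1 then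
        acc ++ ["(" ++ src_word ++ ", " ++ (PySem.List.pyGet? tgt_words 0).getD "" ++ ")"]
      else
        acc ++ ["(" ++ src_word ++ ", [" ++ PySem.Str.join ", " tgt_words ++ "])"]) []
  PySem.Str.join ", " formatted

-- ===== PORT B =====
-- the while-loop of Source B: peel one group of equal source indices per step
def fa_scan (ar_words : List String) (en_words : List String) : List (Int × Int) → List String
  | [] => []
  | (s, t) :: rest =>
    let tgts := t :: (rest.takeWhile (fun p => p.1 == s)).map (fun p => p.2)
    let src_word := (PySem.List.pyGet? ar_words s).getD ""
    let tgt_words := tgts.map (fun i => (PySem.List.pyGet? en_words i).getD "")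
    (if tgt_words.length == 1 then
        "(" ++ src_word ++ ", " ++ (PySem.List.pyGet? tgt_words 0).getD "" ++ ")"
      else
        "(" ++ src_word ++ ", [" ++ PySem.Str.join ", " tgt_words ++ "])")
      :: fa_scan ar_words en_words (rest.dropWhile (fun p => p.1 == s))
  termination_by l => l.length
  decreasing_by
    simp only [List.length_cons]
    exact Nat.lt_succ_of_le (List.length_dropWhile_le _ rest)

def format_alignments_alt (ar_words : List String) (en_words : List String) (alignments : List (Int × Int)) : String :=
  let valid := PySem.List.sorted2
    (alignments.filter (fun p => decide (p.1 < (ar_words.length : Int) ∧ p.2 < (en_words.length : Int))))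
    (fun p => p.1) (fun p => p.2) false
  PySem.Str.join ", " (fa_scan ar_words en_words valid)

-- ===== PRECONDITION & SPEC =====
-- Pre_ excludes exactly the inputs where Python A raises IndexError: a kept pair whose
-- source (resp. target) index is below -len(ar_words) (resp. -len(en_words)).
def Pre_format_alignments (ar_words : List String) (en_words : List String) (alignments : List (Int × Int)) : Prop :=
  ∀ p ∈ alignments, p.1 < (ar_words.length : Int) → p.2 < (en_words.length : Int) →
    (-(ar_words.length : Int) ≤ p.1 ∧ -(en_words.length : Int) ≤ p.2)
instance (ar_words : List String) (en_words : List String) (alignments : List (Int × Int)) : Decidable (Pre_format_alignments ar_words en_words alignments) := by unfold Pre_format_alignments; infer_instance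
def pvWitness_format_alignments : List String × List String × (List (Int × Int)) :=
  (["a", "b"], ["x", "y"], [(0, 1), (1, 0), (0, 0)])
def Spec_format_alignments (ar_words : List String) (en_words : List String) (alignments : List (Int × Int)) (out : String) : Prop := out = format_alignments_alt ar_words en_words alignments
instance (ar_words : List String) (en_words : List String) (alignments : List (Int × Int)) (out : String) : Decidable (Spec_format_alignments ar_words en_words alignments out) := by unfold Spec_format_alignments; infer_instance

-- ===== CLAIM (what is proved, stated in full; the proofs are below) =====
def Claim_equal_format_alignments : Prop := ∀ (ar_words : List String) (en_words : List String) (alignments : List (Int × Int)), Dom_format_alignments ar_words en_words alignments → Pre_format_alignments ar_words en_words alignments → Spec_format_alignments ar_words en_words alignments (format_alignments ar_words en_words alignments)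

-- ===== LEMMAS AND PROOFS =====

-- the valid pairs, the sorted distinct sources, the sorted targets of one source
def faV (ar_words en_words : List String) (alignments : List (Int × Int)) : List (Int × Int) :=
  alignments.filter (fun p => decide (p.1 < (ar_words.length : Int) ∧ p.2 < (en_words.length : Int)))
def faK (V : List (Int × Int)) : List Int :=
  PySem.List.sorted (PySem.Set.ofList (V.map (fun p => p.1))) (fun k => k) false
def faTs (V : List (Int × Int)) (s : Int) : List Int :=
  PySem.List.sorted ((V.filter (fun p => p.1 == s)).map (fun p => p.2)) (fun t => t) false
def faFmt (ar_words en_words : List String) (s : Int) (tgts : List Int) : String :=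
  let src_word := (PySem.List.pyGet? ar_words s).getD ""
  let tgt_words := tgts.map (fun i => (PySem.List.pyGet? en_words i).getD "")
  if tgt_words.length == 1 then
    "(" ++ src_word ++ ", " ++ (PySem.List.pyGet? tgt_words 0).getD "" ++ ")"
  else
    "(" ++ src_word ++ ", [" ++ PySem.Str.join ", " tgt_words ++ "])"

theorem fa_update_nil (l : List Int) : PySem.Set.update [] l = PySem.Set.ofList l := by
  rw [PySem.Set.ofList_eq_foldl]; rfl

-- A computes: sorted distinct sources, each formatted with its sorted target list
theorem fa_A_eq (ar_words en_words : List String) (alignments : List (Int × Int)) :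
    format_alignments ar_words en_words alignments =
      PySem.Str.join ", " ((faK (faV ar_words en_words alignments)).map
        (fun s => faFmt ar_words en_words s (faTs (faV ar_words en_words alignments) s))) := by
  unfold format_alignments
  simp only []
  rw [PySem.List.foldl_ite_eq_foldl_filter
        (p := fun p : Int × Int => p.1 < (ar_words.length : Int) ∧ p.2 < (en_words.length : Int))
        (f := fun (d : PySem.Dict Int (List Int)) p => d.modify p.1 [] (fun ts => ts ++ [p.2]))]
  rw [PySem.Dict.keys_foldl_modify_key _ (fun p : Int × Int => p.1) [] (fun _ p => fun ts => ts ++ [p.2]),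
      PySem.Dict.keys_empty, fa_update_nil]
  congr 1
  refine Eq.trans (PySem.List.foldl_congr_mem _ _
      (fun (acc : List String) (s : Int) =>
        acc ++ [faFmt ar_words en_words s (faTs (faV ar_words en_words alignments) s)]) _ ?_) ?_
  · intro acc s _
    simp only [PySem.Dict.getD_foldl_modify_append, PySem.Dict.getD_empty, List.nil_append]
    unfold faFmt faTs faV
    simp only []
    split <;> rfl
  · rw [PySem.List.foldl_append_singleton_eq_map, List.nil_append]
    rfl

-- sorted2 by (fst, snd) is sorting by the lexicographic key
theorem fa_sorted2_eq_sorted_toLex (xs : List (Int × Int)) :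
    PySem.List.sorted2 xs (fun p => p.1) (fun p => p.2) false
      = PySem.List.sorted xs (fun p => toLex p) false := by
  have h : (fun a b : Int × Int => decide (a.1 < b.1) || (!decide (b.1 < a.1) && decide (a.2 < b.2)))
         = (fun a b : Int × Int => decide ((fun p : Int × Int => toLex p) a < (fun p : Int × Int => toLex p) b)) := by
    funext a b
    by_cases h1 : a.1 < b.1 <;> by_cases h2 : b.1 < a.1 <;> by_cases h3 : a.2 < b.2 <;>
      simp [Prod.Lex.lt_iff, h1, h2, h3] <;> omega
  rw [PySem.List.sorted_eq_foldl_insertBy]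
  show List.foldl (fun acc x => PySem.List.insertBy
      (fun a b : Int × Int => decide (a.1 < b.1) || (!decide (b.1 < a.1) && decide (a.2 < b.2))) x acc) [] xs = _
  rw [h]

-- partition of a list by the distinct values of fst
theorem fa_partition_perm (KS : List Int) (W : List (Int × Int))
    (hmem : ∀ p ∈ W, p.1 ∈ KS) (hnd : KS.Nodup) :
    (KS.flatMap (fun s => W.filter (fun p => p.1 == s))).Perm W := by
  induction KS generalizing W with
  | nil =>
    have hW : W = [] := by
      cases W with
      | nil => rfl
      | cons p ps => exact absurd (hmem p (List.mem_cons_self)) (List.not_mem_nil)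
    simp [hW]
  | cons k KS' ih =>
    rw [List.flatMap_cons]
    have hk : k ∉ KS' := (List.nodup_cons.mp hnd).1
    have hfe : ∀ s ∈ KS', W.filter (fun p => p.1 == s)
        = (W.filter (fun p => !(p.1 == k))).filter (fun p => p.1 == s) := by
      intro s hs
      rw [List.filter_filter]
      refine (List.filter_congr ?_).symm
      intro p _
      by_cases hps : p.1 = s
      · have hsk : s ≠ k := fun hx => hk (hx ▸ hs)
        simp [hps, hsk]
      · simp [hps]
    have hflat : KS'.flatMap (fun s => W.filter (fun p => p.1 == s))
        = KS'.flatMap (fun s => (W.filter (fun p => !(p.1 == k))).filter (fun p => p.1 == s)) := by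
      rw [List.flatMap_def, List.flatMap_def, List.map_congr_left hfe]
    rw [hflat]
    have hmem' : ∀ p ∈ W.filter (fun p => !(p.1 == k)), p.1 ∈ KS' := by
      intro p hp
      rw [List.mem_filter] at hp
      have h1 := hmem p hp.1
      have h2 : ¬ p.1 = k := by simpa using hp.2
      rcases List.mem_cons.mp h1 with h | h
      · exact absurd h h2
      · exact h
    have hperm' := ih (W.filter (fun p => !(p.1 == k))) hmem' (List.nodup_cons.mp hnd).2
    exact (hperm'.append_left (W.filter (fun p => p.1 == k))).trans
      (List.filter_append_perm (fun p => p.1 == k) W)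

-- the canonical grouped list is the lexicographic sort of the valid pairs
theorem fa_sorted_eq_canonical (V : List (Int × Int)) :
    PySem.List.sorted V (fun p => toLex p) false
      = (faK V).flatMap (fun s => (faTs V s).map (fun t => (s, t))) := by
  have hndK : (faK V).Nodup :=
    (PySem.List.sorted_perm _ _ _).symm.nodup (PySem.Set.nodup_ofList _)
  -- each group is a permutation of the corresponding filter of V
  have hgrp : ∀ s ∈ faK V, ((faTs V s).map (fun t => (s, t))).Perm (V.filter (fun p => p.1 == s)) := by
    intro s _
    have h1 : (faTs V s).Perm ((V.filter (fun p => p.1 == s)).map (fun p => p.2)) :=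
      PySem.List.sorted_perm _ _ _
    have h2 := h1.map (fun t => (s, t))
    rw [List.map_map] at h2
    have h3 : (V.filter (fun p => p.1 == s)).map ((fun t => (s, t)) ∘ (fun p => p.2))
        = V.filter (fun p => p.1 == s) := by
      have := List.map_congr_left (l := V.filter (fun p => p.1 == s))
        (f := (fun t : Int => (s, t)) ∘ (fun p : Int × Int => p.2)) (g := id) ?_
      · simpa using this
      · intro p hp
        have : p.1 = s := by simpa using (List.mem_filter.mp hp).2
        simp [Function.comp, ← this]
    rwa [h3] at h2
  have hpermC : ((faK V).flatMap (fun s => (faTs V s).map (fun t => (s, t)))).Perm V := by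
    refine (List.Perm.flatMap_left (faK V) hgrp).trans ?_
    apply fa_partition_perm _ _ ?_ hndK
    intro p hp
    have : p.1 ∈ PySem.Set.ofList (V.map (fun q => q.1)) := by
      rw [PySem.Set.mem_ofList]
      exact List.mem_map.mpr ⟨p, hp, rfl⟩
    exact (PySem.List.sorted_perm _ _ _).mem_iff.mpr this
  refine PySem.List.eq_of_perm_of_pairwise_le_of_injective (fun p : Int × Int => toLex p)
    (fun a b h => toLex.injective h) ((PySem.List.sorted_perm _ _ _).trans hpermC.symm)
    (PySem.List.sorted_pairwise V (fun p => toLex p)) ?_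
  -- the canonical list is pairwise lexicographically nondecreasing
  have hKlt : (faK V).Pairwise (fun a b => a < b) := by
    have hle : (faK V).Pairwise (fun a b => a ≤ b) := by
      have := PySem.List.sorted_pairwise (PySem.Set.ofList (V.map (fun p => p.1))) (fun k : Int => k)
      simpa [faK] using this
    exact (hle.and hndK).imp (fun h => lt_of_le_of_ne h.1 h.2)
  clear hgrp hpermC hndK
  generalize faK V = KS at hKlt ⊢
  revert hKlt
  induction KS with
  | nil => intro _; simp
  | cons k KS' ih =>
    intro hKlt
    rw [List.flatMap_cons, List.pairwise_append]
    refine ⟨?_, ih (List.pairwise_cons.mp hKlt).2, ?_⟩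
    · have hts : (faTs V k).Pairwise (fun a b => a ≤ b) := by
        have := PySem.List.sorted_pairwise ((V.filter (fun p => p.1 == k)).map (fun p => p.2)) (fun t : Int => t)
        simpa [faTs] using this
      exact hts.map _ (fun a b hab => by simp [Prod.Lex.le_iff, hab])
    · intro a ha b hb
      obtain ⟨ta, _, haeq⟩ := List.mem_map.mp ha
      obtain ⟨s, hs, tb, _, hbeq⟩ := by
        simpa [List.mem_flatMap, List.mem_map] using hb
      have hklt : k < s := (List.pairwise_cons.mp hKlt).1 s hs
      subst haeq
      rw [← hbeq]
      simp [Prod.Lex.le_iff]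
      omega

-- the group scan over the canonical list formats group by group
theorem fa_scan_flatMap (ar_words en_words : List String) (KS : List Int) (g : Int → List Int)
    (hnd : KS.Nodup) (hne : ∀ s ∈ KS, g s ≠ []) :
    fa_scan ar_words en_words (KS.flatMap (fun s => (g s).map (fun t => (s, t))))
      = KS.map (fun s => faFmt ar_words en_words s (g s)) := by
  induction KS with
  | nil => simp [fa_scan]
  | cons k KS' ih =>
    obtain ⟨t0, ts', hg⟩ : ∃ t0 ts', g k = t0 :: ts' := by
      cases hgk : g k with
      | nil => exact absurd hgk (hne k List.mem_cons_self)
      | cons a l => exact ⟨a, l, rfl⟩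
    have hk : k ∉ KS' := (List.nodup_cons.mp hnd).1
    have hmem' : ∀ p ∈ KS'.flatMap (fun s => (g s).map (fun t => (s, t))), p.1 ≠ k := by
      intro p hp
      obtain ⟨s, hs, t, _, hpe⟩ := by simpa [List.mem_flatMap, List.mem_map] using hp
      rw [← hpe]
      exact fun hx => hk (hx ▸ hs)
    rw [List.flatMap_cons, hg]
    set rest := KS'.flatMap (fun s => (g s).map (fun t => (s, t))) with hrest
    have htake : (ts'.map (fun t => (k, t)) ++ rest).takeWhile (fun p => p.1 == k)
        = ts'.map (fun t => (k, t)) := by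
      rw [List.takeWhile_append]
      have hall : (ts'.map (fun t => (k, t))).takeWhile (fun p => p.1 == k)
          = ts'.map (fun t => (k, t)) := by
        rw [List.takeWhile_eq_self_iff]
        intro x hx
        obtain ⟨t, _, hxe⟩ := List.mem_map.mp hx
        simp [← hxe]
      rw [hall, if_pos rfl]
      have hrnil : rest.takeWhile (fun p => p.1 == k) = [] := by
        cases hr : rest with
        | nil => rfl
        | cons c cs =>
          have : c.1 ≠ k := hmem' c (by rw [hr]; exact List.mem_cons_self)
          simp [this]
      rw [hrnil, List.append_nil]
    have hdrop : (ts'.map (fun t => (k, t)) ++ rest).dropWhile (fun p => p.1 == k) = rest := by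
      rw [List.dropWhile_append]
      have hall : (ts'.map (fun t => (k, t))).dropWhile (fun p => p.1 == k) = [] := by
        rw [List.dropWhile_eq_nil_iff]
        intro x hx
        obtain ⟨t, _, hxe⟩ := List.mem_map.mp hx
        simp [← hxe]
      rw [hall]
      have hrd : rest.dropWhile (fun p => p.1 == k) = rest := by
        cases hr : rest with
        | nil => rfl
        | cons c cs =>
          have : c.1 ≠ k := hmem' c (by rw [hr]; exact List.mem_cons_self)
          simp [this]
      simp [hrd]
    show fa_scan ar_words en_words ((k, t0) :: (ts'.map (fun t => (k, t)) ++ rest)) = _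
    rw [fa_scan]
    rw [htake, hdrop, List.map_map]
    have hmm : ts'.map ((fun p : Int × Int => p.2) ∘ (fun t => (k, t))) = ts' := by
      simp
    rw [hmm, ih (List.nodup_cons.mp hnd).2 (fun s hs => hne s (List.mem_cons_of_mem _ hs))]
    rw [List.map_cons]
    congr 1
    simp only [faFmt, hg, List.map_cons]

-- ===== VERDICT (by name: the statement is the Claim_ definition above) =====
theorem format_alignments_spec : Claim_equal_format_alignments := by
  intro ar_words en_words alignments _ _
  unfold Spec_format_alignments
  have hB : format_alignments_alt ar_words en_words alignments
      = PySem.Str.join ", " (fa_scan ar_words en_words (PySem.List.sorted2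
          (faV ar_words en_words alignments) (fun p => p.1) (fun p => p.2) false)) := rfl
  rw [fa_A_eq, hB]
  set V := faV ar_words en_words alignments with hV
  have hnd : (faK V).Nodup := by
    unfold faK
    exact (PySem.List.sorted_perm _ _ _).symm.nodup (PySem.Set.nodup_ofList _)
  have hne : ∀ s ∈ faK V, faTs V s ≠ [] := by
    intro s hs
    have hsm : s ∈ PySem.Set.ofList (V.map (fun p => p.1)) :=
      (PySem.List.sorted_perm _ _ _).mem_iff.mp hs
    rw [PySem.Set.mem_ofList] at hsm
    obtain ⟨p, hp, hps⟩ := List.mem_map.mp hsm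
    intro hnil
    unfold faTs at hnil
    rw [PySem.List.sorted_eq_nil_iff] at hnil
    have : p ∈ V.filter (fun p => p.1 == s) := by
      rw [List.mem_filter]
      exact ⟨hp, by simp [hps]⟩
    simp [List.map_eq_nil_iff.mp hnil] at this
  rw [fa_sorted2_eq_sorted_toLex, fa_sorted_eq_canonical,
      fa_scan_flatMap ar_words en_words (faK V) (faTs V) hnd hne]
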